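-- pv_equiv track=rewrite | github.com/leslienboney/COMP431-HW3 | FTP_Client.py | parse_pathname
-- ===== SOURCE A (Python) =====
-- ASCII = {
--     "A": ord("A"), "Z": ord("Z"),
--     "a": ord("a"), "z": ord("z"),
--     "0": ord("0"), "9": ord("9"),
--     "min_ascii_val": 0, "max_ascii_val": 127}
--
-- def parse_pathname(command):
--     pathname = ""
--     if command[0] == '\n' or command[0:2] == '\r\n':
--         return "ERROR -- pathname", pathname
--     else:
--         while len(command) > 1:
--             if len(command) == 2 and command[0:2] == '\r\n':
--                 return command, pathname
--             elif ord(command[0]) >= ASCII["min_ascii_val"] and ord(command[0]) <= ASCII["max_ascii_val"]: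
--                 pathname += command[0]
--                 command = command[1:]
--             else:
--                 return "ERROR -- pathname", pathname
--         return command, pathname
-- ===== SOURCE B (Python) =====
-- def parse_pathname(command):
--     if command[0] == '\n' or command[0:2] == '\r\n':
--         return "ERROR -- pathname", ""
--     if command.endswith('\r\n'):
--         body, tail = command[:-2], '\r\n'
--     else:
--         body, tail = command[:-1], command[-1:]
--     for i, ch in enumerate(body):
--         if ord(ch) > 127:
--             return "ERROR -- pathname", body[:i]
--     return tail, body
-- ===== Notes on version B (the rewrite author's own statement) =====
-- stated objective: faster
-- what changed: B determines the terminator shape up front (endswith '\r\n' vs a single trailing char) by slicing, then does one validation scan over the fixed body with enumerate, instead of A's while-loop that re-slices the command string and concatenates the pathname char by char.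
import Mathlib
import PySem

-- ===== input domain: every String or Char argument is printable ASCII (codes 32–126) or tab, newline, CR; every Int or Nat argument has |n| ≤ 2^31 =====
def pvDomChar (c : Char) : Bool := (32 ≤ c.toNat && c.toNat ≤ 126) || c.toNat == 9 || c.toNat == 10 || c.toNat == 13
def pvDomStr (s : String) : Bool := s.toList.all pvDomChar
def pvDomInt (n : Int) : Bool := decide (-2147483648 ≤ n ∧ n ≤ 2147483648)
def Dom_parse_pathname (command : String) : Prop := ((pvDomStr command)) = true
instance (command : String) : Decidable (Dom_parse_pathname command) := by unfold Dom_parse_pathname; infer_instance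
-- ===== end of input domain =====

-- B splits terminator and body up front with slices, then does one validation scan; A detects the
-- terminator inside a while-loop that re-slices the command and accumulates the pathname char by char.

-- ===== PORT A =====
-- A's while-loop; the accumulated pathname string is represented as a List Char (String.ofList at return).
def pvLoopA : List Char → List Char → String × String
  | [], path => ("", String.ofList path)                      -- len (command) ≤ 1 : return command, pathname
  | [c], path => (String.ofList [c], String.ofList path)          -- len (command) ≤ 1 : return command, pathname
  | c :: d :: rest, path =>
      if c = '\r' ∧ d = '\n' ∧ rest = [] then             -- len == 2 and command[0:2] == '\r\n'
        (String.ofList [c, d], String.ofList path)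
      else if 0 ≤ c.toNat ∧ c.toNat ≤ 127 then            -- ASCII["min_ascii_val"] ≤ ord ≤ ASCII["max_ascii_val"]
        pvLoopA (d :: rest) (path ++ [c])                 -- pathname += command[0]; command = command[1:]
      else
        ("ERROR -- pathname", String.ofList path)

def parse_pathname (command : String) : String × String :=
  match command.toList with
  | [] => ("", "")                                        -- Python raises IndexError here; excluded by Pre_
  | c :: rest =>
      if c = '\n' ∨ (c = '\r' ∧ rest.head? = some '\n') then   -- command[0] == '\n' or command[0:2] == '\r\n'
        ("ERROR -- pathname", "")
      else
        pvLoopA (c :: rest) []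

-- ===== PORT B =====
-- index of the first char with ord > 127 in body (the enumerate loop's test)
def pvFirstBad : List Char → Nat → Option Nat
  | [], _ => none
  | c :: cs, i => if c.toNat > 127 then some i else pvFirstBad cs (i + 1)

def parse_pathname_alt (command : String) : String × String :=
  match command.toList with
  | [] => ("", "")                                        -- Python raises IndexError here; excluded by Pre_
  | c :: rest =>
      if c = '\n' ∨ (c = '\r' ∧ rest.head? = some '\n') then   -- command[0] == '\n' or command[0:2] == '\r\n'
        ("ERROR -- pathname", "")
      else
        let l := c :: rest
        let p : List Char × List Char :=
          if l.length ≥ 2 ∧ l.drop (l.length - 2) = ['\r', '\n'] then  -- command.endswith('\r\n')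
            (l.take (l.length - 2), ['\r', '\n'])                      -- command[:-2], '\r\n'
          else
            (l.take (l.length - 1), l.drop (l.length - 1))             -- command[:-1], command[-1:]
        match pvFirstBad p.1 0 with
        | some i => ("ERROR -- pathname", String.ofList (p.1.take i))      -- body[:i]
        | none => (String.ofList p.2, String.ofList p.1)                       -- tail, body

-- ===== PRECONDITION & SPEC =====
-- Pre_ excludes only the empty string, on which Python A raises IndexError at command[0].
def Pre_parse_pathname (command : String) : Prop := command ≠ ""
instance (command : String) : Decidable (Pre_parse_pathname command) := by unfold Pre_parse_pathname; infer_instance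
def pvWitness_parse_pathname : String := "RETR a.txt\r\n"

def Spec_parse_pathname (command : String) (out : String × String) : Prop := out = parse_pathname_alt command
instance (command : String) (out : String × String) : Decidable (Spec_parse_pathname command out) := by unfold Spec_parse_pathname; infer_instance

-- ===== CLAIM (what is proved, stated in full; the proofs are below) =====
def Claim_equal_parse_pathname : Prop := ∀ (command : String), Dom_parse_pathname command → Pre_parse_pathname command → Spec_parse_pathname command (parse_pathname command)

-- ===== LEMMAS AND PROOFS =====

-- B's else-branch generalized over an accumulated pathname prefix `path`
def pvBmid (l path : List Char) : String × String :=
  let p : List Char × List Char :=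
    if l.length ≥ 2 ∧ l.drop (l.length - 2) = ['\r', '\n'] then
      (l.take (l.length - 2), ['\r', '\n'])
    else
      (l.take (l.length - 1), l.drop (l.length - 1))
  match pvFirstBad p.1 0 with
  | some i => ("ERROR -- pathname", String.ofList (path ++ p.1.take i))
  | none => (String.ofList p.2, String.ofList (path ++ p.1))

theorem pvFirstBad_shift (b : List Char) (i : Nat) :
    pvFirstBad b i = (pvFirstBad b 0).map (· + i) := by
  induction b generalizing i with
  | nil => simp [pvFirstBad]
  | cons c cs ih =>
      by_cases h : c.toNat > 127
      · simp [pvFirstBad, h]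
      · rw [pvFirstBad, pvFirstBad, if_neg h, if_neg h, ih (i + 1), ih 1, Option.map_map]
        cases pvFirstBad cs 0 <;> simp
        omega

theorem pvFirstBad_cons_ok (c : Char) (b : List Char) (hc : ¬ c.toNat > 127) :
    pvFirstBad (c :: b) 0 = (pvFirstBad b 0).map (· + 1) := by
  rw [pvFirstBad, if_neg hc, pvFirstBad_shift b 1]

theorem pvTakeSub (c : Char) (t : List Char) (k : Nat) (h : k + 1 ≤ t.length) :
    (c :: t).take ((c :: t).length - (k + 1)) = c :: t.take (t.length - (k + 1)) := by
  have h2 : (c :: t).length - (k + 1) = (t.length - (k + 1)) + 1 := by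
    simp [List.length_cons]; omega
  rw [h2, List.take_succ_cons]

theorem pvDropSub (c : Char) (t : List Char) (k : Nat) (h : k + 1 ≤ t.length) :
    (c :: t).drop ((c :: t).length - (k + 1)) = t.drop (t.length - (k + 1)) := by
  have h2 : (c :: t).length - (k + 1) = (t.length - (k + 1)) + 1 := by
    simp [List.length_cons]; omega
  rw [h2, List.drop_succ_cons]

-- consuming one in-range char commutes with B's split-then-scan
theorem pvBmid_cons (c : Char) (t path : List Char) (ht : 2 ≤ t.length)
    (hc : c.toNat ≤ 127) : pvBmid (c :: t) path = pvBmid t (path ++ [c]) := by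
  have hc' : ¬ c.toNat > 127 := by omega
  have hcond : ((c :: t).length ≥ 2 ∧ (c :: t).drop ((c :: t).length - 2) = ['\r', '\n'])
      ↔ (t.length ≥ 2 ∧ t.drop (t.length - 2) = ['\r', '\n']) := by
    rw [pvDropSub c t 1 ht]
    constructor
    · rintro ⟨_, h2⟩; exact ⟨ht, h2⟩
    · rintro ⟨_, h2⟩; exact ⟨by simp [List.length_cons]; omega, h2⟩
  by_cases hcr : t.length ≥ 2 ∧ t.drop (t.length - 2) = ['\r', '\n']
  · rw [pvBmid, pvBmid]
    simp only [if_pos hcr, if_pos (hcond.mpr hcr), pvTakeSub c t 1 ht,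
      pvFirstBad_cons_ok c _ hc']
    cases pvFirstBad (t.take (t.length - 2)) 0 <;>
      simp [List.append_assoc]
  · rw [pvBmid, pvBmid]
    have ht1 : 1 + 1 ≤ t.length := ht
    have h1 : 0 + 1 ≤ t.length := by omega
    simp only [if_neg hcr, if_neg (fun h => hcr (hcond.mp h)), pvTakeSub c t 0 h1,
      pvDropSub c t 0 h1, pvFirstBad_cons_ok c _ hc']
    cases pvFirstBad (t.take (t.length - 1)) 0 <;>
      simp [List.append_assoc]

theorem pvLoopA_eq_pvBmid (cs : List Char) : ∀ path, cs ≠ [] → pvLoopA cs path = pvBmid cs path := by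
  induction cs with
  | nil => intro path h; exact absurd rfl h
  | cons c t ih =>
      intro path _
      match t with
      | [] =>
          simp [pvLoopA, pvBmid, pvFirstBad]
      | d :: rest =>
          by_cases hg : c = '\r' ∧ d = '\n' ∧ rest = []
          · obtain ⟨h1, h2, h3⟩ := hg
            subst h1; subst h2; subst h3
            simp [pvLoopA]
            rw [pvBmid]
            simp [pvFirstBad]
          · by_cases hc : c.toNat ≤ 127
            · have hstep : pvLoopA (c :: d :: rest) path = pvLoopA (d :: rest) (path ++ [c]) := by
                simp [pvLoopA, hg, hc]
              rw [hstep, ih (path ++ [c]) (by simp)]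
              match rest with
              | [] =>
                  -- length-2 list, not '\r\n': body = [c], tail = [d] on the left
                  have hne : ¬ (([c, d].length ≥ 2 ∧ ([c, d] : List Char).drop ([c, d].length - 2) = ['\r', '\n'])) := by
                    intro h
                    apply hg
                    have := h.2
                    simp at this
                    exact ⟨this.1, this.2, rfl⟩
                  rw [pvBmid, pvBmid]
                  simp only [if_neg hne]
                  have hc' : ¬ c.toNat > 127 := by omega
                  simp [pvFirstBad, hc']
              | r :: rs =>
                  exact (pvBmid_cons c (d :: r :: rs) path (by simp) hc).symm
            · -- c is non-ASCII: both sides error with the accumulated path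
              have hc' : c.toNat > 127 := by omega
              have hA : pvLoopA (c :: d :: rest) path = ("ERROR -- pathname", String.ofList path) := by
                simp [pvLoopA, hg, hc]
              rw [hA, pvBmid]
              by_cases hcr : (c :: d :: rest).length ≥ 2 ∧
                  (c :: d :: rest).drop ((c :: d :: rest).length - 2) = ['\r', '\n']
              · -- endswith '\r\n': c would have to be '\r' if the list had length 2
                have hlen : rest ≠ [] := by
                  intro h3
                  subst h3
                  have := hcr.2
                  simp at this
                  rw [this.1] at hc'
                  simp at hc'
                have ht2 : 1 + 1 ≤ (d :: rest).length := by
                  cases rest with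
                  | nil => exact absurd rfl hlen
                  | cons r rs => simp
                simp only [if_pos hcr, pvTakeSub c (d :: rest) 1 ht2]
                simp [pvFirstBad, hc']
              · have h1 : 0 + 1 ≤ (d :: rest).length := by simp
                simp only [if_neg hcr, pvTakeSub c (d :: rest) 0 h1]
                simp [pvFirstBad, hc']

-- ===== VERDICT (by name: the statement is the Claim_ definition above) =====
theorem parse_pathname_spec : Claim_equal_parse_pathname := by
  intro command _ hpre
  unfold Spec_parse_pathname parse_pathname parse_pathname_alt
  match hcmd : command.toList with
  | [] => exact absurd (String.toList_eq_nil_iff.mp hcmd) hpre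
  | c :: rest =>
      by_cases hg : c = '\n' ∨ (c = '\r' ∧ rest.head? = some '\n')
      · simp [hg]
      · simp only [if_neg hg]
        rw [pvLoopA_eq_pvBmid (c :: rest) [] (by simp)]
        rw [pvBmid]
        simp
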